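-- pv_equiv track=rewrite | github.com/BDR-Pro/GraphYML | src/utils/index_utils.py | extract_phrases
-- ===== SOURCE A (Python) =====
-- from typing import Any, Dict, List, Tuple, Union, Optional, Set, Hashable
--
-- def extract_phrases(text: str) -> List[str]:
--     """
--     Extract quoted phrases from text.
--
--     Args:
--         text: Text to extract phrases from
--
--     Returns:
--         List[str]: List of phrases
--     """
--     if not text or not isinstance(text, str):
--         return []
--
--     phrases = []
--     in_quote = False
--     current_phrase = []
--
--     for char in text:
--         if char == '"':
--             if in_quote:
--                 # End of phrase
--                 phrases.append(''.join(current_phrase).lower())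
--                 current_phrase = []
--             in_quote = not in_quote
--         elif in_quote:
--             current_phrase.append(char)
--
--     return phrases
-- ===== SOURCE B (Python) =====
-- def extract_phrases(text):
--     """Extract lowercased quoted phrases: split on '"'; the segments at odd
--     indices lie inside quotes, and the last segment is never closed by a quote."""
--     parts = text.split('"')
--     return [p.lower() for i, p in enumerate(parts[:-1]) if i % 2 == 1]
-- ===== Notes on version B (the rewrite author's own statement) =====
-- stated objective: simpler
-- what changed: Replaces the manual in_quote/current_phrase state machine with a single split('"') followed by selecting the odd-indexed segments (excluding the last, which no quote closes), lowercased.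
import Mathlib
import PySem

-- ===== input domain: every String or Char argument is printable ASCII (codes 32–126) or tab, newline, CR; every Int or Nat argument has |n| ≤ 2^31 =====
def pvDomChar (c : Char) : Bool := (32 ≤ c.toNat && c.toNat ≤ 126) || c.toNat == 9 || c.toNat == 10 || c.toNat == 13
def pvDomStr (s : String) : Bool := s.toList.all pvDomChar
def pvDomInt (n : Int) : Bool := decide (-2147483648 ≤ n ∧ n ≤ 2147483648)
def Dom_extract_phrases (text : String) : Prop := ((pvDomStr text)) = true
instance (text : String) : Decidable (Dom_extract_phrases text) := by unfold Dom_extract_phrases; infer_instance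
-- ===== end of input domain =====

-- B replaces A's manual in_quote state machine by split-on-'"' and selection of the
-- odd-indexed segments (the last one excluded), lowercased — simpler, same O(n) cost.


-- ===== PORT A =====
-- state: (phrases, in_quote, current_phrase); ''.join(current).lower() = Str.lower (String.ofList current)
def extract_phrases (text : String) : List String :=
  if text = "" then []
  else
    (text.toList.foldl
      (fun (s : List String × Bool × List Char) c =>
        if c = '"' then
          if s.2.1 then (s.1 ++ [PySem.Str.lower (String.ofList s.2.2)], !s.2.1, ([] : List Char))
          else (s.1, !s.2.1, s.2.2)
        else if s.2.1 then (s.1, s.2.1, s.2.2 ++ [c])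
        else s)
      (([] : List String), false, ([] : List Char))).1

-- ===== PORT B =====
-- text.split('"'): sep is the nonempty literal '"', so Str.split? always returns some
def extract_phrases_alt (text : String) : List String :=
  let parts := (PySem.Str.split? text "\"").getD []
  ((PySem.List.enumerate (PySem.List.slice parts none (some (-1)))).filter
      (fun ip => PySem.Int.mod ip.1 2 == 1)).map
    (fun ip => PySem.Str.lower ip.2)

-- ===== PRECONDITION & SPEC =====
def Spec_extract_phrases (text : String) (out : List String) : Prop := out = extract_phrases_alt text
instance (text : String) (out : List String) : Decidable (Spec_extract_phrases text out) := by unfold Spec_extract_phrases; infer_instance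

-- ===== CLAIM (what is proved, stated in full; the proofs are below) =====
def Claim_equal_extract_phrases : Prop := ∀ (text : String), Dom_extract_phrases text → Spec_extract_phrases text (extract_phrases text)

-- ===== LEMMAS AND PROOFS =====

-- clean accumulator-style splitter on '"' (proof-side model of str.split('"'))
def splitQ (pre : List Char) : List Char → List (List Char)
  | [] => [pre]
  | c :: t => if c = '"' then pre :: splitQ [] t else splitQ (pre ++ [c]) t

theorem splitQ_ne_nil (pre : List Char) (l : List Char) : splitQ pre l ≠ [] := by
  cases l with
  | nil => simp [splitQ]
  | cons c t =>
    by_cases h : c = '"' <;> simp [splitQ, h]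
    exact splitQ_ne_nil _ _

theorem splitQ_pre (l : List Char) : ∀ (pre : List Char),
    ∃ a as, splitQ [] l = a :: as ∧ splitQ pre l = (pre ++ a) :: as := by
  induction l with
  | nil => intro pre; exact ⟨[], [], rfl, by simp [splitQ]⟩
  | cons c t ih =>
    intro pre
    by_cases h : c = '"'
    · exact ⟨[], splitQ [] t, by simp [splitQ, h], by simp [splitQ, h]⟩
    · obtain ⟨a, as, h1, h2⟩ := ih [c]
      obtain ⟨a', as', h1', h2'⟩ := ih (pre ++ [c])
      have e := h1'.symm.trans h1
      injection e with e1 e2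
      subst e1; subst e2
      refine ⟨c :: a', as', ?_, ?_⟩
      · show splitQ [] (c :: t) = _
        simp [splitQ, h, h2]
      · show splitQ pre (c :: t) = _
        simp [splitQ, h, h2']

theorem splitOn_go_eq (l : List Char) : ∀ (fuel : Nat), l.length < fuel →
    ∀ (cur : List Char) (acc : List (List Char)),
      PySem.Chars.splitOn.go ['"'] fuel l cur acc = acc.reverse ++ splitQ cur.reverse l := by
  induction l with
  | nil =>
    intro fuel hf cur acc
    cases fuel with
    | zero => omega
    | succ f => simp [PySem.Chars.splitOn.go, splitQ]
  | cons c t ih =>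
    intro fuel hf cur acc
    cases fuel with
    | zero => simp at hf
    | succ f =>
      rw [PySem.Chars.splitOn.go]
      by_cases h : c = '"'
      · simp [h, List.isPrefixOf]
        rw [ih f (by simpa using hf) [] (cur.reverse :: acc)]
        simp [splitQ]
      · have h2 : List.isPrefixOf ['"'] (c :: t) = false := by
          simp [List.isPrefixOf]
          exact fun hc => absurd hc.symm h
        simp [h2]
        rw [ih f (by simpa using hf) (c :: cur) acc]
        simp [splitQ, h]

theorem splitOn_eq_splitQ (l : List Char) : PySem.Chars.splitOn l ['"'] = splitQ [] l := by
  rw [PySem.Chars.splitOn, splitOn_go_eq l (l.length + 1) (by omega) [] []]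
  simp

-- selection of segments: pick b segs keeps the segments inside quotes (b = currently
-- inside) that are followed by at least one further segment (i.e. are closed)
def pick {α : Type} (b : Bool) : List α → List α
  | [] => []
  | [_] => []
  | s :: t :: r => if b then s :: pick false (t :: r) else pick true (t :: r)

-- even/odd index selection
mutual
def selE {α : Type} : List α → List α
  | [] => []
  | _ :: t => selO t
def selO {α : Type} : List α → List α
  | [] => []
  | s :: t => s :: selE t
end

theorem pick_eq_sel {α : Type} (l : List α) :
    pick false l = selE l.dropLast ∧ pick true l = selO l.dropLast := by
  induction l with
  | nil => exact ⟨rfl, rfl⟩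
  | cons s t ih =>
    cases t with
    | nil => exact ⟨rfl, rfl⟩
    | cons u r =>
      refine ⟨?_, ?_⟩
      · show pick true (u :: r) = selE ((s :: u :: r).dropLast)
        rw [ih.2]; simp [selE]
      · show s :: pick false (u :: r) = selO ((s :: u :: r).dropLast)
        rw [ih.1]; simp [selO]

theorem pick_false_splitQ (pre l : List Char) :
    pick false (splitQ pre l) = pick false (splitQ [] l) := by
  obtain ⟨a, as, h1, h2⟩ := splitQ_pre l pre
  rw [h1, h2]
  cases as <;> simp [pick]

theorem map_selE_selO {α β : Type} (f : α → β) (l : List α) :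
    selE (l.map f) = (selE l).map f ∧ selO (l.map f) = (selO l).map f := by
  induction l with
  | nil => exact ⟨rfl, rfl⟩
  | cons s t ih => exact ⟨by simpa [selE] using ih.2, by simpa [selO] using ih.1⟩

-- the A-side fold step (the lambda of extract_phrases, named for the proofs)
def stepA (s : List String × Bool × List Char) (c : Char) : List String × Bool × List Char :=
  if c = '"' then
    if s.2.1 then (s.1 ++ [PySem.Str.lower (String.ofList s.2.2)], !s.2.1, ([] : List Char))
    else (s.1, !s.2.1, s.2.2)
  else if s.2.1 then (s.1, s.2.1, s.2.2 ++ [c])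
  else s

-- the A-side fold computes pick over splitQ
theorem foldl_eq_pick (l : List Char) : ∀ (phr : List String),
    ((l.foldl stepA (phr, false, ([] : List Char))).1
      = phr ++ (pick false (splitQ [] l)).map (fun seg => PySem.Str.lower (String.ofList seg)))
    ∧ ∀ (cur : List Char), ((l.foldl stepA (phr, true, cur)).1
      = phr ++ (pick true (splitQ cur l)).map (fun seg => PySem.Str.lower (String.ofList seg))) := by
  induction l with
  | nil =>
    intro phr
    constructor
    · simp [splitQ, pick]
    · intro cur; simp [splitQ, pick]
  | cons c t ih =>
    intro phr
    constructor
    · by_cases h : c = '"'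
      · rw [List.foldl_cons, show stepA (phr, false, ([] : List Char)) c = (phr, true, ([] : List Char)) from by simp [stepA, h]]
        rw [(ih phr).2 []]
        obtain ⟨a, as, h1, _⟩ := splitQ_pre t []
        simp [splitQ, h, h1, pick]
      · rw [List.foldl_cons, show stepA (phr, false, ([] : List Char)) c = (phr, false, ([] : List Char)) from by simp [stepA, h]]
        rw [(ih phr).1]
        have hsq : splitQ [] (c :: t) = splitQ [c] t := by
          show (if c = '"' then _ :: splitQ [] t else splitQ ([] ++ [c]) t) = splitQ [c] t
          rw [if_neg h]; rfl
        rw [hsq, pick_false_splitQ [c] t]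
    · intro cur
      by_cases h : c = '"'
      · rw [List.foldl_cons, show stepA (phr, true, cur) c
              = (phr ++ [PySem.Str.lower (String.ofList cur)], false, ([] : List Char)) from by simp [stepA, h]]
        rw [(ih (phr ++ [PySem.Str.lower (String.ofList cur)])).1]
        obtain ⟨a, as, h1, _⟩ := splitQ_pre t []
        simp [splitQ, h, h1, pick]
      · rw [List.foldl_cons, show stepA (phr, true, cur) c = (phr, true, cur ++ [c]) from by simp [stepA, h]]
        rw [(ih phr).2 (cur ++ [c])]
        have hsq : splitQ cur (c :: t) = splitQ (cur ++ [c]) t := by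
          show (if c = '"' then cur :: splitQ [] t else splitQ (cur ++ [c]) t) = splitQ (cur ++ [c]) t
          rw [if_neg h]
        rw [hsq]

-- the B-side enumerate/filter computes selO or selE according to the start parity
theorem enum_filter_eq_sel {α : Type} (l : List α) : ∀ (n : Nat),
    ((PySem.List.enumerate l (n : Int)).filter (fun ip => PySem.Int.mod ip.1 2 == 1)).map
        (fun ip => ip.2)
      = (if n % 2 = 1 then selO l else selE l) := by
  have hfun : (fun (ip : Int × α) => PySem.Int.mod ip.1 2 == 1) = (fun ip => ip.1 % 2 == 1) := by
    funext ip; simp [PySem.Int.mod, Int.fmod_eq_emod]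
  rw [hfun]
  induction l with
  | nil => intro n; by_cases h : n % 2 = 1 <;> simp [PySem.List.enumerate, h, selE, selO]
  | cons x t ih =>
    intro n
    have hm : ((n : Int)) % 2 = ((n % 2 : Nat) : Int) := by omega
    have hcast : ((n : Int) + 1) = ((n + 1 : Nat) : Int) := by push_cast; ring
    simp only [PySem.List.enumerate, List.filter_cons, hcast]
    by_cases h : n % 2 = 1
    · have hb : (((n : Nat) : Int) % 2 == 1) = true := by rw [hm]; simp [h]
      have ht := ih (n + 1)
      rw [if_neg (by omega : ¬ (n + 1) % 2 = 1)] at ht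
      simp [hb, h, selO]
      rw [hcast]; exact ht
    · have hb : (((n : Nat) : Int) % 2 == 1) = false := by rw [hm]; simp; omega
      have ht := ih (n + 1)
      rw [if_pos (by omega : (n + 1) % 2 = 1)] at ht
      simp [hb, h, selE]
      rw [hcast]; exact ht

-- ===== VERDICT (by name: the statement is the Claim_ definition above) =====
theorem extract_phrases_spec : Claim_equal_extract_phrases := by
  intro text _
  show extract_phrases text = extract_phrases_alt text
  have hB : extract_phrases_alt text
      = (pick false (splitQ [] text.toList)).map
          (fun seg => PySem.Str.lower (String.ofList seg)) := by
    unfold extract_phrases_alt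
    have hsplit : (PySem.Str.split? text "\"").getD []
        = (splitQ [] text.toList).map String.ofList := by
      simp [PySem.Str.split?, PySem.Chars.split?, show ("\"" : String).toList = ['"'] from rfl,
        splitOn_eq_splitQ]
    rw [hsplit]
    show ((PySem.List.enumerate
            (PySem.List.slice ((splitQ [] text.toList).map String.ofList) none (some (-1)))).filter
          (fun ip => PySem.Int.mod ip.1 2 == 1)).map (fun ip => PySem.Str.lower ip.2)
        = _
    rw [PySem.List.slice_to_neg_one, ← List.map_dropLast]
    rw [show (fun (ip : Int × String) => PySem.Str.lower ip.2)
          = (PySem.Str.lower ∘ fun (ip : Int × String) => ip.2) from rfl, ← List.map_map]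
    rw [show ((0 : Int)) = ((0 : Nat) : Int) from rfl, enum_filter_eq_sel]
    simp only [show (0 : Nat) % 2 = 0 from rfl, if_neg (by decide : ¬ (0 : Nat) % 2 = 1)]
    rw [(map_selE_selO String.ofList (splitQ [] text.toList).dropLast).1, ← (pick_eq_sel (splitQ [] text.toList)).1]
    simp [List.map_map, Function.comp]
  by_cases h : text = ""
  · subst h; rw [hB]; rfl
  · unfold extract_phrases
    rw [if_neg h, hB]
    have := (foldl_eq_pick text.toList []).1
    simpa using this
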